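-- pv_equiv track=rewrite | github.com/ZScomnet/Programmers | kakao/secretmap.py | solution
-- ===== SOURCE A (Python) =====
-- def solution(n,arr1,arr2):
-- 	answer = []
-- 	for ar1,ar2 in zip(arr1,arr2):
-- 		line = ""
-- 		for i in range(n):
-- 			if ar1 % 2 == 0 and ar2 % 2 == 0:
-- 				line += ' '
-- 			else:
-- 				line += '#'
-- 			ar1 = ar1 // 2
-- 			ar2 = ar2 // 2
-- 		answer.append(line[::-1])
--
-- 	return answer
-- ===== SOURCE B (Python) =====
-- _TBL = str.maketrans('10', '# ')
--
-- def solution(n, arr1, arr2):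
--     if n <= 0:
--         # range(n) is empty, every line is ''
--         return ['' for _ in zip(arr1, arr2)]
--     mask = (1 << n) - 1
--     return [format((a | b) & mask, 'b').zfill(n).translate(_TBL)
--             for a, b in zip(arr1, arr2)]
-- ===== Notes on version B (the rewrite author's own statement) =====
-- stated objective: faster
-- what changed: Replaces the per-bit %2///2 accumulation loop and final [::-1] reversal with a single masked binary conversion format((a|b)&mask,'b').zfill(n) plus a character translation table.
import Mathlib
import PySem

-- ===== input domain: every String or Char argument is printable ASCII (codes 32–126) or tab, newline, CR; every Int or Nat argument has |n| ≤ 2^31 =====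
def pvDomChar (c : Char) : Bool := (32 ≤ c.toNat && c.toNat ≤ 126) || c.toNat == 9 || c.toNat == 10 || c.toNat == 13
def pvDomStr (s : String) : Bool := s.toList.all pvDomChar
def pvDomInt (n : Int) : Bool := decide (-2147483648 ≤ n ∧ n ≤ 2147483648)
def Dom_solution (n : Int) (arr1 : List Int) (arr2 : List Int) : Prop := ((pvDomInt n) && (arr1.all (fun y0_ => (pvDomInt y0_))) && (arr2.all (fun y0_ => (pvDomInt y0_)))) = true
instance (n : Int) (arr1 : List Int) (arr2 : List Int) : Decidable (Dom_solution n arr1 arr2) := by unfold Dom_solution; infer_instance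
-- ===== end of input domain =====

-- B renders each row by one masked binary conversion (format((a|b)&mask,'b').zfill(n)) plus a
-- character translation instead of A's per-bit %2 // 2 loop with a final reversal; measured faster.

-- ===== PORT A =====
-- the inner for-loop's state: (line as its character list, ar1, ar2)
def solStep (st : List Char × Int × Int) (_i : Int) : List Char × Int × Int :=
  let line := if (PySem.Int.mod st.2.1 2 == 0 && PySem.Int.mod st.2.2 2 == 0)
              then st.1 ++ [' '] else st.1 ++ ['#']
  (line, PySem.Int.floordiv st.2.1 2, PySem.Int.floordiv st.2.2 2)

def solution (n : Int) (arr1 : List Int) (arr2 : List Int) : List String :=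
  (arr1.zip arr2).foldl
    (fun answer pr =>
      let st := (PySem.List.pyRange 0 n 1).foldl solStep ([], pr.1, pr.2)
      -- line[::-1] is the reversal of the character list (PySem.List.slice?_none_none_neg_one)
      answer ++ [String.ofList st.1.reverse])
    []

-- ===== PORT B =====
-- format(v, 'b') for v > 0 (no leading zeros); natBin adds the '0' for v = 0
def natBinAux : Nat → List Char
  | 0 => []
  | v+1 => natBinAux ((v+1)/2) ++ [if (v+1) % 2 == 1 then '1' else '0']
decreasing_by exact Nat.div_lt_self (Nat.succ_pos v) (by omega)

def natBin (v : Nat) : List Char := if v == 0 then ['0'] else natBinAux v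

-- str.zfill(w) for an unsigned digit string
def zfill (w : Nat) (l : List Char) : List Char := List.replicate (w - l.length) '0' ++ l

-- str.translate(str.maketrans('10', '# '))
def trChar (c : Char) : Char := if c == '1' then '#' else if c == '0' then ' ' else c

def solution_alt (n : Int) (arr1 : List Int) (arr2 : List Int) : List String :=
  if n ≤ 0 then (arr1.zip arr2).map (fun _ => "")
  else
    -- (1 << n) - 1 with n > 0; a | b, & are Int.lor, Int.land (Python's two's-complement bitwise ops);
    -- the masked value is non-negative, so .toNat is exact for format(·, 'b')
    let mask : Int := 2 ^ n.toNat - 1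
    (arr1.zip arr2).map (fun p =>
      String.ofList ((zfill n.toNat (natBin ((Int.land (Int.lor p.1 p.2) mask).toNat))).map trChar))

-- ===== PRECONDITION & SPEC =====
def Spec_solution (n : Int) (arr1 : List Int) (arr2 : List Int) (out : List String) : Prop := out = solution_alt n arr1 arr2
instance (n : Int) (arr1 : List Int) (arr2 : List Int) (out : List String) : Decidable (Spec_solution n arr1 arr2 out) := by unfold Spec_solution; infer_instance

-- ===== CLAIM (what is proved, stated in full; the proofs are below) =====
def Claim_equal_solution : Prop := ∀ (n : Int) (arr1 : List Int) (arr2 : List Int), Dom_solution n arr1 arr2 → Spec_solution n arr1 arr2 (solution n arr1 arr2)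

-- ===== LEMMAS AND PROOFS =====

-- the characters A's inner loop appends, LSB first
def achars : Nat → Int → Int → List Char
  | 0, _, _ => []
  | k+1, a, b =>
      (if (PySem.Int.mod a 2 == 0 && PySem.Int.mod b 2 == 0) then ' ' else '#')
        :: achars k (PySem.Int.floordiv a 2) (PySem.Int.floordiv b 2)

-- the k-digit binary rendering of m (MSB first)
def padBin : Nat → Nat → List Char
  | 0, _ => []
  | k+1, m => padBin k (m / 2) ++ [if m % 2 == 1 then '1' else '0']

-- the low k bits of x, as an integer
def maskI (k : Nat) (x : Int) : Int := Int.land x (2 ^ k - 1)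

theorem land_zero (x : Int) : Int.land x 0 = 0 := by
  cases x <;> simp [Int.land, Nat.ldiff]

theorem pow_succ_sub_one (k : Nat) : (2:Int) ^ (k+1) - 1 = Int.bit true ((2:Int) ^ k - 1) := by
  rw [Int.bit_val]; simp; ring

theorem maskI_succ (k : Nat) (x : Int) :
    maskI (k+1) x = 2 * maskI k (Int.div2 x) + (cond (Int.bodd x) 1 0) := by
  unfold maskI
  rw [pow_succ_sub_one]
  conv_lhs => rw [← Int.bit_decomp x]
  rw [Int.land_bit, Int.bit_val, Bool.and_true]

theorem maskI_bounds (k : Nat) : ∀ (x : Int), 0 ≤ maskI k x ∧ maskI k x < 2 ^ k := by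
  induction k with
  | zero => intro x; simp [maskI, land_zero]
  | succ k ih =>
      intro x
      have h := ih (Int.div2 x)
      have hp : (2:Int) ^ (k+1) = 2 * 2 ^ k := by ring
      rw [maskI_succ]
      cases Int.bodd x <;> simp <;> omega

theorem floordiv_two_eq_div2 (a : Int) : PySem.Int.floordiv a 2 = Int.div2 a := by
  rw [PySem.Int.floordiv_eq_ediv_of_pos (by omega), Int.div2_val]

theorem mod_two_eq_cond (a : Int) : PySem.Int.mod a 2 = cond (Int.bodd a) 1 0 := by
  rw [PySem.Int.mod_eq_emod_of_pos (by omega)]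
  have h := Int.bodd_add_div2 a
  cases hb : Int.bodd a <;> rw [hb] at h <;> simp at h ⊢ <;> omega

theorem bodd_lor (a b : Int) : Int.bodd (Int.lor a b) = (Int.bodd a || Int.bodd b) := by
  conv_lhs => rw [← Int.bit_decomp a, ← Int.bit_decomp b, Int.lor_bit, Int.bodd_bit]

theorem div2_bit (b : Bool) (n : Int) : Int.div2 (Int.bit b n) = n := by
  have h1 := Int.bodd_add_div2 (Int.bit b n)
  rw [Int.bodd_bit] at h1
  generalize hd : Int.div2 (Int.bit b n) = d at h1 ⊢
  rw [Int.bit_val] at h1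
  cases b <;> simp only [cond_true, cond_false] at h1 <;> omega

theorem div2_lor (a b : Int) : Int.div2 (Int.lor a b) = Int.lor (Int.div2 a) (Int.div2 b) := by
  conv_lhs => rw [← Int.bit_decomp a, ← Int.bit_decomp b, Int.lor_bit, div2_bit]

theorem maskI_toNat_succ (k : Nat) (x : Int) :
    (maskI (k+1) x).toNat = 2 * (maskI k (Int.div2 x)).toNat + (cond (Int.bodd x) 1 0) := by
  have h := maskI_bounds k (Int.div2 x)
  rw [maskI_succ]
  cases Int.bodd x <;> simp <;> omega

theorem achars_reverse (k : Nat) : ∀ (a b : Int),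
    (achars k a b).reverse = (padBin k (maskI k (Int.lor a b)).toNat).map trChar := by
  induction k with
  | zero => intro a b; simp [achars, padBin]
  | succ k ih =>
      intro a b
      have hm := maskI_toNat_succ k (Int.lor a b)
      rw [div2_lor] at hm
      have hdiv : (maskI (k+1) (Int.lor a b)).toNat / 2
          = (maskI k (Int.lor (Int.div2 a) (Int.div2 b))).toNat := by
        cases hb : Int.bodd (Int.lor a b) <;> rw [hb] at hm <;> simp at hm <;> omega
      have hmod : (maskI (k+1) (Int.lor a b)).toNat % 2
          = cond (Int.bodd a || Int.bodd b) 1 0 := by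
        rw [bodd_lor] at hm
        cases hb : (Int.bodd a || Int.bodd b) <;> rw [hb] at hm <;> simp at hm ⊢ <;> omega
      simp only [achars, padBin, List.reverse_cons, List.map_append, hdiv]
      rw [ih, floordiv_two_eq_div2, floordiv_two_eq_div2]
      congr 1
      simp only [List.map_cons, List.map_nil, hmod]
      rw [mod_two_eq_cond a, mod_two_eq_cond b]
      cases Int.bodd a <;> cases Int.bodd b <;> simp [trChar]

theorem padBin_zero (k : Nat) : padBin k 0 = List.replicate k '0' := by
  induction k with
  | zero => rfl
  | succ k ih => simp [padBin, ih, List.replicate_succ']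

theorem natBinAux_pos (m : Nat) (hm : 0 < m) :
    natBinAux m = natBinAux (m / 2) ++ [if m % 2 == 1 then '1' else '0'] := by
  cases m with
  | zero => omega
  | succ v => rw [natBinAux]

theorem zfill_natBinAux (k : Nat) : ∀ m : Nat, 0 < m → m < 2 ^ k →
    zfill k (natBinAux m) = padBin k m := by
  induction k with
  | zero => intro m h1 h2; omega
  | succ k ih =>
      intro m h1 h2
      rw [natBinAux_pos m h1]
      have h0 : natBinAux 0 = [] := by rw [natBinAux]
      by_cases h : m / 2 = 0
      · simp only [padBin, h, h0, padBin_zero, zfill, List.length_singleton,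
          List.nil_append, Nat.add_sub_cancel]
      · have h2' : m / 2 < 2 ^ k := by
          have : (2:Nat) ^ (k+1) = 2 * 2 ^ k := by ring
          omega
        have := ih (m / 2) (by omega) h2'
        simp only [zfill] at this ⊢
        simp only [padBin, ← this, List.length_append, List.length_singleton]
        rw [show k + 1 - ((natBinAux (m / 2)).length + 1) = k - (natBinAux (m / 2)).length by omega]
        simp [List.append_assoc]

theorem zfill_natBin (k m : Nat) (hk : 1 ≤ k) (hm : m < 2 ^ k) :
    zfill k (natBin m) = padBin k m := by
  by_cases h : m = 0
  · subst h
    simp only [natBin, beq_self_eq_true, if_pos, zfill, List.length_singleton, padBin_zero]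
    rw [show k = (k - 1) + 1 by omega, List.replicate_succ']
    simp
  · rw [natBin, if_neg (by simpa using h)]
    exact zfill_natBinAux k m (by omega) hm

theorem foldl_solStep (l : List Int) : ∀ (acc : List Char) (a b : Int),
    (l.foldl solStep (acc, a, b)).1 = acc ++ achars l.length a b := by
  induction l with
  | nil => intro acc a b; simp [achars]
  | cons x xs ih =>
      intro acc a b
      simp only [List.foldl_cons, List.length_cons, solStep, achars]
      rw [ih]
      split <;> simp

theorem foldl_append_map {α β : Type} (f : α → β) (l : List α) :
    ∀ acc : List β, l.foldl (fun ans p => ans ++ [f p]) acc = acc ++ l.map f := by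
  induction l with
  | nil => intro acc; simp
  | cons x xs ih => intro acc; simp [ih]

-- ===== VERDICT (by name: the statement is the Claim_ definition above) =====
theorem solution_spec : Claim_equal_solution := by
  intro n arr1 arr2 _
  unfold Spec_solution solution solution_alt
  rw [foldl_append_map]
  simp only [List.nil_append]
  by_cases hn : n ≤ 0
  · rw [if_pos hn]
    apply List.map_congr_left
    intro p _
    have hlen : (PySem.List.pyRange 0 n 1).length = 0 := by
      rw [PySem.List.length_pyRange_one]; omega
    have := foldl_solStep (PySem.List.pyRange 0 n 1) [] p.1 p.2
    rw [hlen] at this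
    simp only [this, achars, List.append_nil]
    rfl
  · rw [if_neg hn]
    apply List.map_congr_left
    intro p _
    have hlen : (PySem.List.pyRange 0 n 1).length = n.toNat := by
      rw [PySem.List.length_pyRange_one]; omega
    have hf := foldl_solStep (PySem.List.pyRange 0 n 1) [] p.1 p.2
    rw [hlen] at hf
    simp only [hf, List.nil_append]
    rw [achars_reverse]
    congr 1
    have hb := maskI_bounds n.toNat (Int.lor p.1 p.2)
    have hmlt : (maskI n.toNat (Int.lor p.1 p.2)).toNat < 2 ^ n.toNat := by
      zify
      rw [Int.toNat_of_nonneg hb.1]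
      exact hb.2
    have hmlt' : ((Int.lor p.1 p.2).land (2 ^ n.toNat - 1)).toNat < 2 ^ n.toNat := by
      simpa [maskI] using hmlt
    rw [zfill_natBin n.toNat _ (by omega) hmlt']
    simp [maskI]
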